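-- pv_equiv track=rewrite | github.com/cpadlab/AdventJS | 2024/reto-20.py | fix_gift_list
-- ===== SOURCE A (Python) =====
-- def fix_gift_list(received: list[str], expected: list[str]) -> dict[str, int]:
--
--     received_count = {}
--     expected_count = {}
--
--     for gift in received:received_count[gift] = received_count.get(gift, 0) + 1
--     for gift in expected:expected_count[gift] = expected_count.get(gift, 0) + 1
--
--     missing = {}
--     extra = {}
--
--     for gift in expected_count:
--         expected_qty = expected_count[gift]
--         received_qty = received_count.get(gift, 0)
--
--         if received_qty < expected_qty:missing[gift] = expected_qty - received_qty
--
--     for gift in received_count: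
--         received_qty = received_count[gift]
--         expected_qty = expected_count.get(gift, 0)
--
--         if received_qty > expected_qty:extra[gift] = received_qty - expected_qty
--
--     return { "missing": missing, "extra": extra }
-- ===== SOURCE B (Python) =====
-- def fix_gift_list(received: list[str], expected: list[str]) -> dict[str, int]:
--     # Matching/cancellation algorithm: pair each expected gift with one received
--     # item (removing it from a pool); unpaired expected items are the missing
--     # ones, leftover pool items are the extras. No counting dicts are built
--     # during the scan; deficits/surpluses are read off the leftover lists.
--     rem = list(received)
--     unmatched = []
--     for g in expected:
--         try:
--             rem.remove(g)
--         except ValueError: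
--             unmatched.append(g)
--     missing = {g: unmatched.count(g) for g in dict.fromkeys(expected) if g in unmatched}
--     extra = {g: rem.count(g) for g in dict.fromkeys(received) if g in rem}
--     return {"missing": missing, "extra": extra}
-- ===== Notes on version B (the rewrite author's own statement) =====
-- stated objective: alternative
-- what changed: Replaces A's count-both-lists-then-compare-counts approach by a matching/cancellation algorithm: each expected gift is paired with (removed from) a pool copied from received, unpaired expected items collect in an unmatched list, and the two result dicts are read off the leftover lists with list.count; no frequency dicts are built.
import Mathlib
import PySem

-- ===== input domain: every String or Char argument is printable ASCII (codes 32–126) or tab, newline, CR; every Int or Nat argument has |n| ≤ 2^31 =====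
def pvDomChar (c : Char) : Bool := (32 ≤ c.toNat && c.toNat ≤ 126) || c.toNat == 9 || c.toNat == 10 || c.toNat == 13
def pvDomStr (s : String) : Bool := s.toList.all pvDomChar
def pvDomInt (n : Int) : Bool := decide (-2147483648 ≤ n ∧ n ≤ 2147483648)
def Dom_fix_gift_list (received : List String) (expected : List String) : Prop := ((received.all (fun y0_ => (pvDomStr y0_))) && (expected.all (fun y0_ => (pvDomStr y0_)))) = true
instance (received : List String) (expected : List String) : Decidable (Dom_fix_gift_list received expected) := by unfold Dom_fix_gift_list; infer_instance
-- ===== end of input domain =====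

-- B replaces A's two counting dicts and compare-counts loops by a matching/cancellation
-- algorithm (pair expected gifts with a pool of received ones; read deficits and
-- surpluses off the leftover lists); same cost class on the tested sizes, not faster.

-- ===== PORT A =====
-- literal transliteration of A; `expected_count[gift]` is read as getD … 0, exact because the
-- loop iterates the dict's own keys, so the key is always present.
def fix_gift_list (received : List String) (expected : List String) : List (String × List (String × Int)) :=
  let received_count := received.foldl (fun d g => d.insert g (d.getD g 0 + 1)) (PySem.Dict.empty : PySem.Dict String Int)
  let expected_count := expected.foldl (fun d g => d.insert g (d.getD g 0 + 1)) (PySem.Dict.empty : PySem.Dict String Int)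
  let missing := expected_count.keys.foldl (fun m g =>
      if received_count.getD g 0 < expected_count.getD g 0 then
        m.insert g (expected_count.getD g 0 - received_count.getD g 0)
      else m) PySem.Dict.empty
  let extra := received_count.keys.foldl (fun x g =>
      if expected_count.getD g 0 < received_count.getD g 0 then
        x.insert g (received_count.getD g 0 - expected_count.getD g 0)
      else x) PySem.Dict.empty
  [("missing", missing.items), ("extra", extra.items)]

-- ===== PORT B =====
-- the matching loop: try rem.remove(g); except ValueError: unmatched.append(g)
def pvMatchStep (s : List String × List String) (g : String) : List String × List String :=
  match PySem.List.remove? s.1 g with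
  | some r => (r, s.2)
  | none => (s.1, s.2 ++ [g])

def fix_gift_list_alt (received : List String) (expected : List String) : List (String × List (String × Int)) :=
  let p := expected.foldl pvMatchStep (received, [])
  let missing := ((PySem.List.dedup expected).filter (fun g => p.2.contains g)).map
      (fun g => (g, (p.2.count g : Int)))
  let extra := ((PySem.List.dedup received).filter (fun g => p.1.contains g)).map
      (fun g => (g, (p.1.count g : Int)))
  [("missing", missing), ("extra", extra)]

-- ===== PRECONDITION & SPEC =====
def Spec_fix_gift_list (received : List String) (expected : List String) (out : List (String × List (String × Int))) : Prop := out = fix_gift_list_alt received expected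
instance (received : List String) (expected : List String) (out : List (String × List (String × Int))) : Decidable (Spec_fix_gift_list received expected out) := by unfold Spec_fix_gift_list; infer_instance

-- ===== CLAIM (what is proved, stated in full; the proofs are below) =====
def Claim_equal_fix_gift_list : Prop := ∀ (received : List String) (expected : List String), Dom_fix_gift_list received expected → Spec_fix_gift_list received expected (fix_gift_list received expected)

-- ===== LEMMAS AND PROOFS =====

-- a conditional-insert loop over fresh distinct keys yields exactly the filtered key list
theorem items_foldl_cond_insert (l : List String) (cond : String → Prop) [DecidablePred cond]
    (f : String → Int) (d : PySem.Dict String Int) (hnd : l.Nodup)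
    (hfresh : ∀ g ∈ l, d.contains g = false) :
    (l.foldl (fun m g => if cond g then m.insert g (f g) else m) d).items
      = d.items ++ (l.filter (fun g => decide (cond g))).map (fun g => (g, f g)) := by
  induction l generalizing d with
  | nil => simp
  | cons x xs ih =>
    simp only [List.foldl_cons, List.filter_cons]
    rcases List.nodup_cons.mp hnd with ⟨hx, hxs⟩
    by_cases hc : cond x
    · simp only [hc, if_true, decide_true]
      rw [ih (d.insert x (f x)) hxs ?_]
      · rw [PySem.Dict.items_insert]
        simp [hfresh x (by simp)]
      · intro g hg
        rw [PySem.Dict.contains_insert]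
        have hne : (g == x) = false := by
          simp only [beq_eq_false_iff_ne]; exact fun h => hx (h ▸ hg)
        simp [hne, hfresh g (List.mem_cons_of_mem _ hg)]
    · simp only [hc, if_false, decide_false, Bool.false_eq_true]
      rw [ih d hxs (fun g hg => hfresh g (List.mem_cons_of_mem _ hg))]

-- A's half-loop, in closed form over list counts
theorem a_half (a b : List String) :
    ((PySem.Dict.counter a).keys.foldl (fun m g =>
        if (PySem.Dict.counter b).getD g 0 < (PySem.Dict.counter a).getD g 0 then
          m.insert g ((PySem.Dict.counter a).getD g 0 - (PySem.Dict.counter b).getD g 0)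
        else m) PySem.Dict.empty).items
      = ((PySem.Set.ofList a).filter (fun g => decide ((b.count g : Int) < (a.count g : Int)))).map
          (fun g => (g, (a.count g : Int) - (b.count g : Int))) := by
  rw [PySem.Dict.keys_counter,
      items_foldl_cond_insert _ _ _ _ (PySem.Set.nodup_ofList a)
        (fun g _ => PySem.Dict.contains_empty g)]
  simp only [PySem.Dict.getD_counter]
  rfl

-- the matching loop's leftover counts: leftover pool = counts minus the cancelled
-- min, unmatched = expected occurrences the pool could not cover
theorem match_counts (es : List String) (rem un : List String) (g : String) :
    (es.foldl pvMatchStep (rem, un)).1.count g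
        = rem.count g - min (rem.count g) (es.count g)
      ∧ (es.foldl pvMatchStep (rem, un)).2.count g
        = un.count g + (es.count g - min (rem.count g) (es.count g)) := by
  induction es generalizing rem un with
  | nil => simp
  | cons x xs ih =>
    simp only [List.foldl_cons]
    by_cases hx : x ∈ rem
    · have hs := PySem.List.remove?_eq_some_erase rem x hx
      simp only [pvMatchStep, hs]
      obtain ⟨h1, h2⟩ := ih (rem.erase x) un
      rw [h1, h2]
      have hcx : 0 < rem.count x := List.count_pos_iff.mpr hx
      by_cases hg : g = x
      · subst hg
        simp only [List.count_erase_self, List.count_cons, beq_self_eq_true, if_true]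
        omega
      · have he : List.count g (rem.erase x) = List.count g rem :=
          List.count_erase_of_ne hg
        have hc : List.count g (x :: xs) = List.count g xs := by
          simp [Ne.symm hg]
        omega
    · have hs := (PySem.List.remove?_eq_none_iff rem x).mpr hx
      simp only [pvMatchStep, hs]
      obtain ⟨h1, h2⟩ := ih rem (un ++ [x])
      rw [h1, h2]
      have hcx : rem.count x = 0 := List.count_eq_zero.mpr hx
      by_cases hg : g = x
      · subst hg
        simp only [List.count_append, List.count_cons, List.count_nil,
          beq_self_eq_true, if_true]
        omega
      · have hc : List.count g (x :: xs) = List.count g xs := by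
          simp [Ne.symm hg]
        have ha : List.count g (un ++ [x]) = List.count g un := by
          simp [Ne.symm hg]
        omega

-- B's half, rewritten into the same closed form (l: leftover list, a: dedup source,
-- with leftover counts a.count - min(a.count, b.count) pointwise)
theorem b_half (a b l : List String)
    (hcnt : ∀ g, l.count g = a.count g - min (a.count g) (b.count g)) :
    ((PySem.List.dedup a).filter (fun g => l.contains g)).map (fun g => (g, (l.count g : Int)))
      = ((PySem.Set.ofList a).filter (fun g => decide ((b.count g : Int) < (a.count g : Int)))).map
          (fun g => (g, (a.count g : Int) - (b.count g : Int))) := by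
  rw [PySem.List.dedup_eq_ofList]
  have hfil : (PySem.Set.ofList a).filter (fun g => l.contains g)
      = (PySem.Set.ofList a).filter (fun g => decide ((b.count g : Int) < (a.count g : Int))) := by
    refine List.filter_congr ?_
    intro g _
    have h2 : (g ∈ l) ↔ ((b.count g : Int) < (a.count g : Int)) := by
      rw [← List.count_pos_iff, hcnt g]
      omega
    calc l.contains g = decide (g ∈ l) := by simp
      _ = _ := decide_eq_decide.mpr h2
  rw [hfil]
  refine List.map_congr_left ?_
  intro g hg
  rcases List.mem_filter.mp hg with ⟨_, hpos⟩
  have hlt : (b.count g : Int) < (a.count g : Int) := of_decide_eq_true hpos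
  have hv : (l.count g : Int) = (a.count g : Int) - (b.count g : Int) := by
    rw [hcnt g]; omega
  rw [hv]

-- ===== VERDICT (by name: the statement is the Claim_ definition above) =====
theorem fix_gift_list_spec : Claim_equal_fix_gift_list := by
  intro received expected _
  show _ = _
  unfold fix_gift_list fix_gift_list_alt
  simp only [PySem.Dict.foldl_insert_getD_add_one_eq_counter]
  rw [a_half expected received, a_half received expected]
  have hm := fun g => (match_counts expected received [] g)
  rw [b_half expected received _ (fun g => by
        have h := (hm g).2
        simpa [Nat.min_comm] using h),
      b_half received expected _ (fun g => (hm g).1)]
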